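-- pv_equiv track=rewrite | github.com/thanasee/python-code | mergeMLAB.py | parse_basis_sections
-- ===== SOURCE A (Python) =====
-- from collections import OrderedDict
--
-- def parse_basis_sections(header_lines):
--     """
--     Parse all 'Basis set for <element>' sections from the file header.
--
--     Each basis set entry is a pair of integers (n1, n2) representing
--     the radial and angular quantum number indices of the basis function.
--
--     Parameters
--     ----------
--     header_lines : list of str
--         Lines from the file header (before the first configuration block).
--
--     Returns
--     -------
--     OrderedDict
--         Mapping of element symbol (str) to list of (n1, n2) int tuples,
--         preserving the order in which elements appear.
--     """
--     basis_map = OrderedDict()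
--     i = 0
--     while i < len(header_lines):
--         stripped = header_lines[i].strip()
--         if stripped.startswith('Basis set for '):
--             element = stripped.replace('Basis set for ', '').strip()
--             start = i + 2
--             end = start
--             while end < len(header_lines):
--                 test = header_lines[end].strip()
--                 if test.startswith('Basis set for ') or 'Configuration num.' in test:
--                     break
--                 if test and set(test) <= set('*='):
--                     break
--                 end += 1
--             rows = []
--             for row in header_lines[start:end]:
--                 if row.strip():
--                     parts = row.split()
--                     if len(parts) >= 2:
--                         rows.append((int(parts[0]), int(parts[1])))
--             basis_map[element] = rows
--             i = end
--             continue
--         i += 1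
--     return basis_map
-- ===== SOURCE B (Python) =====
-- def parse_basis_sections(header_lines):
--     """Single flat pass with explicit state (current element, rows, skip counter)
--     instead of an index-jumping outer loop with a nested terminator scan."""
--     basis_map = {}
--     current = None
--     rows = []
--     skip = 0
--     for line in header_lines:
--         if skip > 0:
--             skip -= 1
--             continue
--         s = line.strip()
--         if s.startswith('Basis set for '):
--             if current is not None:
--                 basis_map[current] = rows
--             current = s.replace('Basis set for ', '').strip()
--             rows = []
--             skip = 1
--             continue
--         if current is not None:
--             if 'Configuration num.' in s or (s and all(c in '*=' for c in s)):
--                 basis_map[current] = rows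
--                 current = None
--                 rows = []
--             elif s:
--                 parts = line.split()
--                 if len(parts) >= 2:
--                     rows.append((int(parts[0]), int(parts[1])))
--     if current is not None:
--         basis_map[current] = rows
--     return basis_map
-- ===== Notes on version B (the rewrite author's own statement) =====
-- stated objective: alternative
-- what changed: Replaces A's index-jumping outer while-loop with a nested terminator re-scan plus slice re-parse by a single flat fold over the lines carrying explicit state (open element, row accumulator, skip counter).
import Mathlib
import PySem

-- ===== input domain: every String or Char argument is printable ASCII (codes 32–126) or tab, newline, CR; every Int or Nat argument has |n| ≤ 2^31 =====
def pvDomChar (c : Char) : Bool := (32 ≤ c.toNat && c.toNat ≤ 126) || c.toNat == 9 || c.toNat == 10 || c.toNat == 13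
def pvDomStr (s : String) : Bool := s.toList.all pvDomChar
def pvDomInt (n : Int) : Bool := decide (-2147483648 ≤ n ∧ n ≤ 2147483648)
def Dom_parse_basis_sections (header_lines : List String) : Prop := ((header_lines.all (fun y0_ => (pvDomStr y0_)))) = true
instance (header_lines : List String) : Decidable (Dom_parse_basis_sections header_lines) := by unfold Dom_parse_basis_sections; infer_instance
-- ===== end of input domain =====

-- B replaces A's index-jumping outer loop with nested terminator re-scan by one flat fold over the
-- lines carrying explicit state (open element, row accumulator, skip counter); return value only.

-- ===== PORT A =====
-- inner `while end < len(...)` scan for the section terminator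
def pvA_scanEnd (hl : List String) (e : Nat) : Nat :=
  if h : e < hl.length then
    let test := PySem.Str.strip hl[e]
    if PySem.Str.startswith test "Basis set for " || PySem.Str.isIn "Configuration num." test then e
    else if test != "" && (PySem.Set.ofList test.toList).all (fun c => c == '*' || c == '=') then e
    else pvA_scanEnd hl (e + 1)
  else e
termination_by hl.length - e

theorem pvA_scanEnd_ge (hl : List String) (e : Nat) : e ≤ pvA_scanEnd hl e := by
  fun_induction pvA_scanEnd hl e <;> omega

-- body of `for row in header_lines[start:end]` (getD 0/1 is Python's parts[0]/parts[1], in range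
-- since 2 ≤ len(parts); a `none` from int() is a ValueError, excluded by Pre_)
def pvA_rowStep (rows : List (Int × Int)) (row : String) : List (Int × Int) :=
  if PySem.Str.strip row != "" then
    let parts := PySem.Str.split₀ row
    if 2 ≤ parts.length then
      match PySem.Int.ofStr? (parts.getD 0 ""), PySem.Int.ofStr? (parts.getD 1 "") with
      | some a, some b => rows ++ [(a, b)]
      | _, _ => rows
    else rows
  else rows

-- outer `while i < len(header_lines)` loop
def pvA_loop (hl : List String) (i : Nat) (d : PySem.Dict String (List (Int × Int))) :
    PySem.Dict String (List (Int × Int)) :=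
  if h : i < hl.length then
    let stripped := PySem.Str.strip hl[i]
    if PySem.Str.startswith stripped "Basis set for " then
      let element := PySem.Str.strip (PySem.Str.replace stripped "Basis set for " "")
      let e := pvA_scanEnd hl (i + 2)
      let rows := (PySem.List.slice hl (some ((i : Int) + 2)) (some (e : Int))).foldl pvA_rowStep []
      pvA_loop hl e (d.insert element rows)
    else pvA_loop hl (i + 1) d
  else d
termination_by hl.length - i
decreasing_by
  · have := pvA_scanEnd_ge hl (i + 2); omega
  · omega

def parse_basis_sections (header_lines : List String) : List (String × List (Int × Int)) :=
  (pvA_loop header_lines 0 PySem.Dict.empty).items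

-- ===== PORT B =====
-- one step of B's flat loop; state = (basis_map, current, rows, skip)
def pvB_step (st : PySem.Dict String (List (Int × Int)) × Option String × List (Int × Int) × Nat)
    (line : String) : PySem.Dict String (List (Int × Int)) × Option String × List (Int × Int) × Nat :=
  match st with
  | (d, cur, rows, skip) =>
    if skip > 0 then (d, cur, rows, skip - 1)
    else
      let s := PySem.Str.strip line
      if PySem.Str.startswith s "Basis set for " then
        ((match cur with | some el => d.insert el rows | none => d),
         some (PySem.Str.strip (PySem.Str.replace s "Basis set for " "")), [], 1)
      else
        match cur with
        | none => (d, none, rows, skip)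
        | some el =>
          if PySem.Str.isIn "Configuration num." s ||
             (s != "" && s.toList.all (fun c => c == '*' || c == '=')) then
            (d.insert el rows, none, [], 0)
          else if s != "" then
            let parts := PySem.Str.split₀ line
            if 2 ≤ parts.length then
              match PySem.Int.ofStr? (parts.getD 0 ""), PySem.Int.ofStr? (parts.getD 1 "") with
              | some a, some b => (d, some el, rows ++ [(a, b)], 0)
              | _, _ => (d, some el, rows, 0)
            else (d, some el, rows, 0)
          else (d, some el, rows, 0)

def parse_basis_sections_alt (header_lines : List String) : List (String × List (Int × Int)) :=
  let st := header_lines.foldl pvB_step (PySem.Dict.empty, none, [], 0)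
  (match st.2.1 with | some el => st.1.insert el st.2.2.1 | none => st.1).items

-- ===== PRECONDITION & SPEC =====
-- helpers for Pre_ (do not reach either port)
def pvIsHeader (s : String) : Bool := PySem.Str.startswith (PySem.Str.strip s) "Basis set for "
def pvIsTerm (s : String) : Bool :=
  pvIsHeader s || PySem.Str.isIn "Configuration num." (PySem.Str.strip s) ||
  ((PySem.Str.strip s) != "" && (PySem.Str.strip s).toList.all (fun c => c == '*' || c == '='))
-- which lines open a section: a header line not immediately preceded by an opening header
def pvEff : Bool → List String → List Bool
  | _, [] => []
  | prev, l :: ls => (pvIsHeader l && !prev) :: pvEff (pvIsHeader l && !prev) ls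
def pvRowOK (s : String) : Bool :=
  if PySem.Str.strip s != "" then
    if 2 ≤ (PySem.Str.split₀ s).length then
      ((PySem.Int.ofStr? ((PySem.Str.split₀ s).getD 0 "")).isSome &&
       (PySem.Int.ofStr? ((PySem.Str.split₀ s).getD 1 "")).isSome)
    else true
  else true
-- Pre_ excludes exactly the inputs on which A raises ValueError: a line parsed as a basis row
-- (inside a section) whose first two whitespace tokens are not both valid Python ints.
def Pre_parse_basis_sections (header_lines : List String) : Prop :=
  ∀ m, m < header_lines.length →
    (∃ k, k < header_lines.length ∧ (pvEff false header_lines).getD k false = true ∧ k + 2 ≤ m ∧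
      ∀ t, t < m + 1 → k + 2 ≤ t → pvIsTerm (header_lines.getD t "") = false) →
    pvRowOK (header_lines.getD m "") = true
instance (header_lines : List String) : Decidable (Pre_parse_basis_sections header_lines) := by
  unfold Pre_parse_basis_sections; infer_instance

def pvWitness_parse_basis_sections : List String :=
  ["Basis set for H", "====", " 1 2", "3 4 5", "====", "junk line"]

def Spec_parse_basis_sections (header_lines : List String) (out : List (String × List (Int × Int))) : Prop := out = parse_basis_sections_alt header_lines
instance (header_lines : List String) (out : List (String × List (Int × Int))) : Decidable (Spec_parse_basis_sections header_lines out) := by unfold Spec_parse_basis_sections; infer_instance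

-- ===== CLAIM (what is proved, stated in full; the proofs are below) =====
def Claim_equal_parse_basis_sections : Prop := ∀ (header_lines : List String), Dom_parse_basis_sections header_lines → Pre_parse_basis_sections header_lines → Spec_parse_basis_sections header_lines (parse_basis_sections header_lines)

-- ===== LEMMAS AND PROOFS =====
-- proof-side view of B: flush the open section, run the fold from position j
def pvB_flush (st : PySem.Dict String (List (Int × Int)) × Option String × List (Int × Int) × Nat) :
    PySem.Dict String (List (Int × Int)) :=
  match st.2.1 with | some el => st.1.insert el st.2.2.1 | none => st.1

def pvB_run (hl : List String)
    (st : PySem.Dict String (List (Int × Int)) × Option String × List (Int × Int) × Nat) (j : Nat) :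
    PySem.Dict String (List (Int × Int)) :=
  pvB_flush (List.foldl pvB_step st (hl.drop j))

theorem pv_all_ofList (cs : List Char) :
    ((PySem.Set.ofList cs).all (fun c => c == '*' || c == '=')) =
    (cs.all (fun c => c == '*' || c == '=')) := by
  rw [Bool.eq_iff_iff]
  simp only [List.all_eq_true, PySem.Set.mem_ofList]

theorem pvB_run_nil (hl : List String)
    (st : PySem.Dict String (List (Int × Int)) × Option String × List (Int × Int) × Nat)
    (j : Nat) (h : hl.length ≤ j) : pvB_run hl st j = pvB_flush st := by
  unfold pvB_run
  rw [List.drop_eq_nil_of_le h]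
  rfl

theorem pvB_run_cons (hl : List String)
    (st : PySem.Dict String (List (Int × Int)) × Option String × List (Int × Int) × Nat)
    (j : Nat) (h : j < hl.length) : pvB_run hl st j = pvB_run hl (pvB_step st hl[j]) (j + 1) := by
  unfold pvB_run
  rw [List.drop_eq_getElem_cons h]
  rfl

-- one step of B on a plain row line is A's row-parsing step
theorem pvB_step_row (d : PySem.Dict String (List (Int × Int))) (el : String)
    (acc : List (Int × Int)) (line : String)
    (hH : PySem.Str.startswith (PySem.Str.strip line) "Basis set for " = false)
    (hC : PySem.Str.isIn "Configuration num." (PySem.Str.strip line) = false)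
    (hSB : ((PySem.Str.strip line) != "" && (PySem.Str.strip line).toList.all (fun c => c == '*' || c == '=')) = false) :
    pvB_step (d, some el, acc, 0) line = (d, some el, pvA_rowStep acc line, 0) := by
  simp only [pvB_step, pvA_rowStep, gt_iff_lt, lt_self_iff_false, if_false, hH, hC, hSB,
    Bool.or_false, Bool.false_eq_true]
  split_ifs <;>
    first
      | rfl
      | (cases PySem.Int.ofStr? ((PySem.Str.split₀ line).getD 0 "") <;>
         cases PySem.Int.ofStr? ((PySem.Str.split₀ line).getD 1 "") <;> rfl)

-- inside a section B's fold accumulates exactly A's rows up to A's terminator scan, then flushes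
theorem pvI (hl : List String) (j : Nat) (d : PySem.Dict String (List (Int × Int)))
    (el : String) (acc : List (Int × Int)) :
    pvB_run hl (d, some el, acc, 0) j =
    pvB_run hl
      (d.insert el ((List.take (pvA_scanEnd hl j - j) (List.drop j hl)).foldl pvA_rowStep acc),
       none, [], 0) (pvA_scanEnd hl j) := by
  by_cases h : j < hl.length
  · by_cases hH : PySem.Str.startswith (PySem.Str.strip hl[j]) "Basis set for " = true
    · -- terminator: a new header line; both sides take the same step from position j
      have hse : pvA_scanEnd hl j = j := by
        rw [pvA_scanEnd]; simp only [dif_pos h, hH, Bool.true_or, if_true]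
      rw [hse, Nat.sub_self, List.take_zero, List.foldl_nil, pvB_run_cons hl _ j h,
        pvB_run_cons hl _ j h]
      have hstep : pvB_step (d, some el, acc, 0) hl[j] =
          pvB_step (d.insert el acc, none, [], 0) hl[j] := by
        simp only [pvB_step, gt_iff_lt, lt_self_iff_false, if_false, hH, if_true]
      rw [hstep]
    · rw [Bool.not_eq_true] at hH
      by_cases hC : PySem.Str.isIn "Configuration num." (PySem.Str.strip hl[j]) = true
      · -- terminator: 'Configuration num.' line; B flushes and ignores it
        have hse : pvA_scanEnd hl j = j := by
          rw [pvA_scanEnd]; simp only [dif_pos h, hH, hC, Bool.or_true, if_true]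
        rw [hse, Nat.sub_self, List.take_zero, List.foldl_nil, pvB_run_cons hl _ j h,
          pvB_run_cons hl _ j h]
        have hstep : pvB_step (d, some el, acc, 0) hl[j] =
            pvB_step (d.insert el acc, none, [], 0) hl[j] := by
          simp only [pvB_step, gt_iff_lt, lt_self_iff_false, if_false, hH, hC, Bool.true_or,
            if_true, Bool.false_eq_true]
        rw [hstep]
      · rw [Bool.not_eq_true] at hC
        by_cases hSB : ((PySem.Str.strip hl[j]) != "" && (PySem.Str.strip hl[j]).toList.all (fun c => c == '*' || c == '=')) = true
        · -- terminator: a '*='-only line; B flushes and ignores it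
          have hSA : ((PySem.Str.strip hl[j]) != "" && (PySem.Set.ofList (PySem.Str.strip hl[j]).toList).all (fun c => c == '*' || c == '=')) = true := by
            rw [pv_all_ofList]; exact hSB
          have hse : pvA_scanEnd hl j = j := by
            rw [pvA_scanEnd]
            simp only [dif_pos h, hH, hC, Bool.or_self, Bool.false_eq_true, if_false, hSA, if_true]
          rw [hse, Nat.sub_self, List.take_zero, List.foldl_nil, pvB_run_cons hl _ j h,
            pvB_run_cons hl _ j h]
          have hstep : pvB_step (d, some el, acc, 0) hl[j] =
              pvB_step (d.insert el acc, none, [], 0) hl[j] := by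
            simp only [pvB_step, gt_iff_lt, lt_self_iff_false, if_false, hH, hC, hSB, Bool.or_true,
              if_true, Bool.false_eq_true]
          rw [hstep]
        · -- an ordinary line inside the section: both accumulate A's row step
          rw [Bool.not_eq_true] at hSB
          have hSA : ((PySem.Str.strip hl[j]) != "" && (PySem.Set.ofList (PySem.Str.strip hl[j]).toList).all (fun c => c == '*' || c == '=')) = false := by
            rw [pv_all_ofList]; exact hSB
          have hse : pvA_scanEnd hl j = pvA_scanEnd hl (j + 1) := by
            rw [pvA_scanEnd]
            simp only [dif_pos h, hH, hC, Bool.or_self, Bool.false_eq_true, if_false, hSA]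
          have hge : j + 1 ≤ pvA_scanEnd hl (j + 1) := pvA_scanEnd_ge hl (j + 1)
          rw [hse, List.drop_eq_getElem_cons h,
            show pvA_scanEnd hl (j + 1) - j = (pvA_scanEnd hl (j + 1) - (j + 1)) + 1 by omega,
            List.take_succ_cons, List.foldl_cons, pvB_run_cons hl _ j h,
            pvB_step_row d el acc hl[j] hH hC hSB]
          exact pvI hl (j + 1) d el (pvA_rowStep acc hl[j])
  · -- past the end: B's final flush inserts the accumulated rows, as A does
    have hse : pvA_scanEnd hl j = j := by rw [pvA_scanEnd]; simp only [dif_neg h]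
    have hj : hl.length ≤ j := by omega
    rw [hse, Nat.sub_self, List.take_zero, List.foldl_nil, pvB_run_nil hl _ j hj,
      pvB_run_nil hl _ j hj]
    rfl
termination_by hl.length - j
decreasing_by omega

-- B's fold from position i with no open section computes A's outer loop from i
theorem pvM (hl : List String) (i : Nat) (d : PySem.Dict String (List (Int × Int))) :
    pvB_run hl (d, none, [], 0) i = pvA_loop hl i d := by
  by_cases h : i < hl.length
  · rw [pvA_loop]
    by_cases hH : PySem.Str.startswith (PySem.Str.strip hl[i]) "Basis set for " = true
    · simp only [dif_pos h, hH, if_true]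
      rw [pvB_run_cons hl _ i h]
      have hstep : pvB_step (d, none, [], 0) hl[i] =
          (d, some (PySem.Str.strip (PySem.Str.replace (PySem.Str.strip hl[i]) "Basis set for " "")), [], 1) := by
        simp only [pvB_step, gt_iff_lt, lt_self_iff_false, if_false, hH, if_true]
      rw [hstep]
      by_cases h1 : i + 1 < hl.length
      · -- the line after the header is skipped (start = i + 2), then pvI finishes the section
        rw [pvB_run_cons hl _ (i + 1) h1]
        have hskip : pvB_step (d, some (PySem.Str.strip (PySem.Str.replace (PySem.Str.strip hl[i]) "Basis set for " "")), [], 1) hl[i + 1] =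
            (d, some (PySem.Str.strip (PySem.Str.replace (PySem.Str.strip hl[i]) "Basis set for " "")), [], 0) := by
          simp only [pvB_step, gt_iff_lt, Nat.zero_lt_one, if_true]
        have hcast : ((i : Int) + 2) = ((i + 2 : Nat) : Int) := by push_cast; ring
        rw [hskip, pvI hl (i + 2) d _ [], hcast,
          PySem.List.slice_natCast hl (i + 2) (pvA_scanEnd hl (i + 2))]
        exact pvM hl (pvA_scanEnd hl (i + 2)) (d.insert _ _)
      · -- the header is the last line: the section is empty
        have h2 : ¬ i + 2 < hl.length := by omega
        have hse : pvA_scanEnd hl (i + 2) = i + 2 := by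
          rw [pvA_scanEnd]; simp only [dif_neg h2]
        rw [pvB_run_nil hl _ (i + 1) (by omega), hse]
        rw [pvA_loop]
        simp only [dif_neg (show ¬ i + 2 < hl.length from h2)]
        have hslice : PySem.List.slice hl (some ((i : Int) + 2)) (some ((i + 2 : Nat) : Int)) = [] := by
          have : ((i : Int) + 2) = ((i + 2 : Nat) : Int) := by push_cast; ring
          rw [this, PySem.List.slice_natCast, Nat.sub_self, List.take_zero]
        rw [hslice]
        rfl
    · rw [Bool.not_eq_true] at hH
      simp only [dif_pos h, hH, Bool.false_eq_true, if_false]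
      rw [pvB_run_cons hl _ i h]
      have hstep : pvB_step (d, none, [], 0) hl[i] = (d, none, [], 0) := by
        simp only [pvB_step, gt_iff_lt, lt_self_iff_false, if_false, hH, Bool.false_eq_true]
      rw [hstep]
      exact pvM hl (i + 1) d
  · rw [pvA_loop, pvB_run_nil hl _ i (by omega)]
    simp only [dif_neg h]
    rfl
termination_by hl.length - i
decreasing_by
  all_goals
    have := pvA_scanEnd_ge hl (i + 2)
    omega

-- ===== VERDICT (by name: the statement is the Claim_ definition above) =====
theorem parse_basis_sections_spec : Claim_equal_parse_basis_sections := by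
  intro hl _ _
  unfold Spec_parse_basis_sections parse_basis_sections parse_basis_sections_alt
  rw [← pvM hl 0 PySem.Dict.empty]
  rfl
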